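-- pv_equiv track=rewrite | github.com/ibrahimprodhan393-create/MINI | app/main.py | custom_knowledge_answer
-- ===== SOURCE A (Python) =====
-- def tokenize_question(value: str) -> set[str]:
--     clean = "".join(ch.lower() if ch.isalnum() else " " for ch in value)
--     return {token for token in clean.split() if len(token) >= 2}
--
-- def custom_knowledge_answer(message: str, custom: str) -> str | None:
--     if not custom.strip():
--         return None
--     question_tokens = tokenize_question(message)
--     blocks = [block.strip() for block in custom.replace("\r\n", "\n").split("\n\n") if block.strip()]
--     best_score = 0
--     best_block = ""
--     for block in blocks:
--         head, _, body = block.partition("\n")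
--         haystack = f"{head} {body or block}"
--         score = len(question_tokens & tokenize_question(haystack))
--         if score > best_score:
--             best_score = score
--             best_block = block
--     if best_score >= 2:
--         return best_block[:1400]
--     if len(blocks) == 1:
--         return blocks[0][:1400]
--     return None
-- ===== SOURCE B (Python) =====
-- def tokenize_question(value: str) -> set[str]:
--     clean = "".join(ch.lower() if ch.isalnum() else " " for ch in value)
--     return {token for token in clean.split() if len(token) >= 2}
--
-- def custom_knowledge_answer(message: str, custom: str) -> str | None:
--     # Inverted index: map each token to the posting list of block positions that
--     # contain it, then scatter-add the question tokens into a score array.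
--     # (Tokenizing a block directly is equivalent to A's head+body haystack: the
--     # haystack is head + " " + (body or block), which yields the same token set.)
--     if not custom.strip():
--         return None
--     blocks = [block.strip() for block in custom.replace("\r\n", "\n").split("\n\n") if block.strip()]
--     index: dict[str, list[int]] = {}
--     for pos, block in enumerate(blocks):
--         for token in tokenize_question(block):
--             index.setdefault(token, []).append(pos)
--     scores = [0] * len(blocks)
--     for token in tokenize_question(message):
--         for pos in index.get(token, []):
--             scores[pos] += 1
--     best_score, best_pos = 0, 0
--     for pos, score in enumerate(scores):
--         if score > best_score:
--             best_score, best_pos = score, pos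
--     if best_score >= 2:
--         return blocks[best_pos][:1400]
--     if len(blocks) == 1:
--         return blocks[0][:1400]
--     return None
-- ===== Notes on version B (the rewrite author's own statement) =====
-- stated objective: alternative
-- what changed: B replaces A's per-block gather loop (head/body haystack re-tokenization and set intersection with a running best) by an inverted index: a dict from token to the posting list of block positions, a scatter pass adding each question token's postings into a score array, and a final first-strict-max scan over the score array.
import Mathlib
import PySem

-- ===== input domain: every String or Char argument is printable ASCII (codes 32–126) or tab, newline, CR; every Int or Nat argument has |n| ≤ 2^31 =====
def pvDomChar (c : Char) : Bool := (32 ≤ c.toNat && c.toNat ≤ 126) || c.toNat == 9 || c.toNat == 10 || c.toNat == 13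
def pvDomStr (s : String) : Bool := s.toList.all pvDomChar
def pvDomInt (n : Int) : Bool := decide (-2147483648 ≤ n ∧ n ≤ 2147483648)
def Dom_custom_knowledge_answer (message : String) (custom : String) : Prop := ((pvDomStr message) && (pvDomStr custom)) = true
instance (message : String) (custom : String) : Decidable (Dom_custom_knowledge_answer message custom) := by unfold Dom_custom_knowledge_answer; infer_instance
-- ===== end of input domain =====

-- B replaces A's per-block gather (haystack re-tokenization + set intersection, running best)
-- by an inverted index token -> posting list of block positions, a scatter pass into a score
-- array, and a first-strict-max scan; objective: alternative (same cost).

-- tokenize_question, the helper both Python sources share verbatim (ported once, used by both ports)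
def pvTok (v : List Char) : PySem.Set (List Char) :=
  PySem.Set.ofList
    ((PySem.Chars.split₀
        (v.map (fun ch => if PySem.Chars.isalnum ch then PySem.Chars.lowerChar ch else ' '))).filter
      (fun t => decide (2 ≤ t.length)))

-- ===== PORT A =====
def custom_knowledge_answer (message : String) (custom : String) : Option String :=
  if (PySem.Chars.strip custom.toList).isEmpty then none else
  let questionTokens := pvTok message.toList
  let blocks := ((PySem.Chars.splitOn (PySem.Chars.replace custom.toList ['\r','\n'] ['\n']) ['\n','\n']).filter
      (fun b => !(PySem.Chars.strip b).isEmpty)).map (fun b => PySem.Chars.strip b)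
  let r := blocks.foldl (fun (st : Int × List Char) block =>
      -- block.partition("\n") ported by hand via find; exact for the one-character separator "\n"
      let i := PySem.Chars.find block ['\n']
      let head := if i = -1 then block else block.take i.toNat
      let body := if i = -1 then ([] : List Char) else block.drop (i.toNat + 1)
      let haystack := head ++ ' ' :: (if body.isEmpty then block else body)
      let score := PySem.Set.len (PySem.Set.inter questionTokens (pvTok haystack))
      if st.1 < score then (score, block) else st) (0, ([] : List Char))
  if 2 ≤ r.1 then some (String.ofList (PySem.List.slice r.2 none (some 1400)))
  else if blocks.length = 1 then some (String.ofList (PySem.List.slice (PySem.List.pyGetD blocks 0 []) none (some 1400)))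
  else none

-- ===== PORT B =====
def custom_knowledge_answer_alt (message : String) (custom : String) : Option String :=
  if (PySem.Chars.strip custom.toList).isEmpty then none else
  let blocks := ((PySem.Chars.splitOn (PySem.Chars.replace custom.toList ['\r','\n'] ['\n']) ['\n','\n']).filter
      (fun b => !(PySem.Chars.strip b).isEmpty)).map (fun b => PySem.Chars.strip b)
  -- index.setdefault(token, []).append(pos): Dict.insert overwrites in place and appends new
  -- keys at the end, exactly Python's dict behaviour for this idiom; iterating the token Set
  -- here only builds a dict looked up afterwards, so hash order cannot affect the result
  let index := (PySem.List.enumerate blocks 0).foldl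
      (fun d (p : Int × List Char) =>
        (pvTok p.2).foldl (fun d t => d.insert t (d.getD t [] ++ [p.1])) d)
      (PySem.Dict.empty : PySem.Dict (List Char) (List Int))
  -- scores[pos] += 1: pos is always in range, so the total pySetD/pyGetD forms are exact here;
  -- iterating the question-token Set only accumulates sums, so order cannot affect the result
  let scores := (pvTok message.toList).foldl
      (fun sc t => (index.getD t []).foldl
          (fun sc pos => PySem.List.pySetD sc pos (PySem.List.pyGetD sc pos 0 + 1)) sc)
      (List.replicate blocks.length (0 : Int))
  let r := (PySem.List.enumerate scores 0).foldl
      (fun (st : Int × Int) (p : Int × Int) => if st.1 < p.2 then (p.2, p.1) else st) (0, 0)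
  if 2 ≤ r.1 then some (String.ofList (PySem.List.slice (PySem.List.pyGetD blocks r.2 []) none (some 1400)))
  else if blocks.length = 1 then some (String.ofList (PySem.List.slice (PySem.List.pyGetD blocks 0 []) none (some 1400)))
  else none

-- ===== PRECONDITION & SPEC =====
def Spec_custom_knowledge_answer (message : String) (custom : String) (out : Option String) : Prop := out = custom_knowledge_answer_alt message custom
instance (message : String) (custom : String) (out : Option String) : Decidable (Spec_custom_knowledge_answer message custom out) := by unfold Spec_custom_knowledge_answer; infer_instance

-- ===== CLAIM (what is proved, stated in full; the proofs are below) =====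
def Claim_equal_custom_knowledge_answer : Prop := ∀ (message : String) (custom : String), Dom_custom_knowledge_answer message custom → Spec_custom_knowledge_answer message custom (custom_knowledge_answer message custom)

-- ===== LEMMAS AND PROOFS =====

lemma pv_go_acc (s : List Char) : ∀ cur acc,
    PySem.Chars.split₀.go s cur acc = acc.reverse ++ PySem.Chars.split₀.go s cur [] := by
  induction s with
  | nil =>
      intro cur acc
      simp only [PySem.Chars.split₀.go]
      split_ifs <;> simp
  | cons c rest ih =>
      intro cur acc
      simp only [PySem.Chars.split₀.go]
      split_ifs with h1 h2
      · rw [ih [] acc]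
      · rw [ih [] (cur.reverse :: acc), ih [] [cur.reverse]]
        simp
      · rw [ih (c :: cur) acc]

lemma pv_split₀_append_space (xs ys : List Char) :
    PySem.Chars.split₀ (xs ++ ' ' :: ys) = PySem.Chars.split₀ xs ++ PySem.Chars.split₀ ys := by
  have key : ∀ (xs : List Char) (cur : List Char),
      PySem.Chars.split₀.go (xs ++ ' ' :: ys) cur [] =
        PySem.Chars.split₀.go xs cur [] ++ PySem.Chars.split₀.go ys [] [] := by
    intro xs
    induction xs with
    | nil =>
        intro cur
        simp only [List.nil_append, PySem.Chars.split₀.go]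
        have hsp : PySem.Chars.isspace ' ' = true := by decide
        rw [hsp]
        simp only [if_true]
        split_ifs with h
        · simp
        · rw [pv_go_acc ys [] [cur.reverse]]
    | cons c rest ih =>
        intro cur
        simp only [List.cons_append, PySem.Chars.split₀.go]
        split_ifs with h1 h2
        · exact ih []
        · rw [pv_go_acc (rest ++ ' ' :: ys) [] [cur.reverse], ih [],
            pv_go_acc rest [] [cur.reverse]]
          simp
        · exact ih (c :: cur)
  exact key xs []

lemma pv_mem_pvTok_append (x y : List Char) (c : Char)
    (hc : (if PySem.Chars.isalnum c then PySem.Chars.lowerChar c else ' ') = ' ') (t : List Char) :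
    t ∈ pvTok (x ++ c :: y) ↔ t ∈ pvTok x ∨ t ∈ pvTok y := by
  unfold pvTok
  rw [List.map_append, List.map_cons, hc, pv_split₀_append_space, List.filter_append]
  simp [PySem.Set.mem_ofList]

lemma pv_mem_pvTok_nil (t : List Char) : t ∈ pvTok ([] : List Char) ↔ False := by
  have h0 : PySem.Chars.split₀ ([] : List Char) = [] := rfl
  simp [pvTok, h0]

-- membership in the tokens of A's haystack equals membership in the tokens of the block itself
lemma pv_tok_haystack (block t : List Char) :
    (t ∈ pvTok
      ((if PySem.Chars.find block ['\n'] = -1 then block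
        else block.take (PySem.Chars.find block ['\n']).toNat) ++ ' ' ::
        (if (if PySem.Chars.find block ['\n'] = -1 then ([] : List Char)
             else block.drop ((PySem.Chars.find block ['\n']).toNat + 1)).isEmpty then block
         else if PySem.Chars.find block ['\n'] = -1 then ([] : List Char)
              else block.drop ((PySem.Chars.find block ['\n']).toNat + 1)))) ↔ t ∈ pvTok block := by
  have hsp : (if PySem.Chars.isalnum ' ' then PySem.Chars.lowerChar ' ' else ' ') = ' ' := by decide
  have hnl : (if PySem.Chars.isalnum '\n' then PySem.Chars.lowerChar '\n' else ' ') = ' ' := by decide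
  by_cases h : PySem.Chars.find block ['\n'] = -1
  · simp only [h, if_true, List.isEmpty_nil]
    rw [pv_mem_pvTok_append _ _ _ hsp]
    tauto
  · have hge : 0 ≤ PySem.Chars.find block ['\n'] := by
      have := PySem.Chars.neg_one_le_find block ['\n']; omega
    obtain ⟨hpre, -⟩ := PySem.Chars.find_spec (s := block) (sub := ['\n']) hge
    set n := (PySem.Chars.find block ['\n']).toNat with hn
    obtain ⟨rest, hrest⟩ := hpre
    have hdrop : block.drop n = '\n' :: rest := by simpa using hrest.symm
    have hdrop1 : block.drop (n + 1) = rest := by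
      have h1 : block.drop (n+1) = (block.drop n).drop 1 := by rw [List.drop_drop]
      rw [h1, hdrop]; rfl
    have hblock : block = block.take n ++ '\n' :: rest := by
      rw [← hdrop, List.take_append_drop]
    have hmemb : t ∈ pvTok block ↔ t ∈ pvTok (block.take n) ∨ t ∈ pvTok rest := by
      conv_lhs => rw [hblock]
      exact pv_mem_pvTok_append _ _ _ hnl t
    simp only [h, if_false, hdrop1]
    by_cases hre : rest.isEmpty
    · have hrnil : rest = [] := by simpa using hre
      simp only [hre, if_true]
      rw [pv_mem_pvTok_append _ _ _ hsp, hmemb]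
      rw [hrnil, pv_mem_pvTok_nil] at hmemb ⊢
      tauto
    · simp only [hre]
      rw [pv_mem_pvTok_append _ _ _ hsp, hmemb]
      simp

-- A's haystack score is the number of question tokens appearing in the block's own token set
lemma pv_scoreA (q : PySem.Set (List Char)) (block : List Char) :
    PySem.Set.len (PySem.Set.inter q (pvTok
      ((if PySem.Chars.find block ['\n'] = -1 then block
        else block.take (PySem.Chars.find block ['\n']).toNat) ++ ' ' ::
        (if (if PySem.Chars.find block ['\n'] = -1 then ([] : List Char)
             else block.drop ((PySem.Chars.find block ['\n']).toNat + 1)).isEmpty then block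
         else if PySem.Chars.find block ['\n'] = -1 then ([] : List Char)
              else block.drop ((PySem.Chars.find block ['\n']).toNat + 1)))))
      = ((q.countP (fun t => decide (t ∈ pvTok block)) : Nat) : Int) := by
  unfold PySem.Set.len PySem.Set.inter
  rw [← List.countP_eq_length_filter]
  congr 1
  apply List.countP_congr
  intro x _
  constructor
  · intro hx
    have := (PySem.Set.contains_iff _ x).mp hx
    simpa using (pv_tok_haystack block x).mp this
  · intro hx
    exact (PySem.Set.contains_iff _ x).mpr ((pv_tok_haystack block x).mpr (by simpa using hx))

-- characterisation of A's running-best loop: final score is the running max, and (when some block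
-- beats the seed) the kept block is the first block attaining that max
lemma pv_selA (sc : List Char → Int) (blocks : List (List Char)) : ∀ (s0 : Int) (b0 : List Char),
    (blocks.foldl (fun st b => if st.1 < sc b then (sc b, b) else st) (s0, b0)).1
      = blocks.foldl (fun a b => max a (sc b)) s0
  ∧ (blocks.foldl (fun a b => max a (sc b)) s0 = s0 →
      blocks.foldl (fun st b => if st.1 < sc b then (sc b, b) else st) (s0, b0) = (s0, b0))
  ∧ (s0 < blocks.foldl (fun a b => max a (sc b)) s0 →
      (blocks.foldl (fun st b => if st.1 < sc b then (sc b, b) else st) (s0, b0)).2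
        = (blocks.find? (fun b => sc b == blocks.foldl (fun a b => max a (sc b)) s0)).getD b0) := by
  have hfm : ∀ (l : List (List Char)) (a : Int),
      l.foldl (fun x b => max x (sc b)) a = (l.map sc).foldl max a := by
    intro l a; rw [List.foldl_map]
  have hle : ∀ (l : List (List Char)) (a : Int), a ≤ l.foldl (fun x b => max x (sc b)) a := by
    intro l a; rw [hfm]; exact (PySem.List.le_foldl_max (l.map sc) a).1
  induction blocks with
  | nil =>
      intro s0 b0
      exact ⟨rfl, fun _ => rfl, fun h => absurd h (lt_irrefl s0)⟩
  | cons b rest ih =>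
      intro s0 b0
      simp only [List.foldl_cons]
      by_cases hb : s0 < sc b
      · have hmax : max s0 (sc b) = sc b := max_eq_right hb.le
        rw [if_pos hb, hmax]
        obtain ⟨ih1, ih2, ih3⟩ := ih (sc b) b
        refine ⟨ih1, ?_, ?_⟩
        · intro hM
          exact absurd (hM ▸ hle rest (sc b)) (not_le.mpr (hM ▸ hb))
        · intro hlt
          by_cases heq : sc b = rest.foldl (fun a b => max a (sc b)) (sc b)
          · rw [List.find?_cons_of_pos (by simpa using heq), ih2 heq.symm]
            rfl
          · have hscle : sc b ≤ rest.foldl (fun a b => max a (sc b)) (sc b) := hle rest (sc b)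
            have hsclt : sc b < rest.foldl (fun a b => max a (sc b)) (sc b) := lt_of_le_of_ne hscle heq
            rw [List.find?_cons_of_neg (by simpa using heq), ih3 hsclt]
            have hmem : rest.foldl (fun a b => max a (sc b)) (sc b) ∈ rest.map sc := by
              rcases PySem.List.foldl_max_mem (rest.map sc) (sc b) with h1 | h1
              · exact absurd ((hfm rest (sc b)).trans h1).symm heq
              · rw [hfm]; exact h1
            obtain ⟨x, hx, hxe⟩ := List.mem_map.mp hmem
            have hsome : (rest.find? (fun y => sc y == rest.foldl (fun a b => max a (sc b)) (sc b))).isSome := by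
              rw [List.find?_isSome]
              exact ⟨x, hx, by simpa using hxe⟩
            obtain ⟨v, hv⟩ := Option.isSome_iff_exists.mp hsome
            rw [hv]
            rfl
      · have hmax : max s0 (sc b) = s0 := max_eq_left (not_lt.mp hb)
        rw [if_neg hb, hmax]
        obtain ⟨ih1, ih2, ih3⟩ := ih s0 b0
        refine ⟨ih1, ih2, ?_⟩
        · intro hlt
          have hble : sc b ≤ s0 := not_lt.mp hb
          rw [List.find?_cons_of_neg (by simp; omega)]
          exact ih3 hlt

-- characterisation of B's first-strict-max scan over the enumerated score list
lemma pv_selB (ss : List Int) : ∀ (s : Int) (s0 i0 : Int),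
    ((PySem.List.enumerate ss s).foldl
        (fun (st : Int × Int) (p : Int × Int) => if st.1 < p.2 then (p.2, p.1) else st) (s0, i0)).1
      = ss.foldl max s0
  ∧ (ss.foldl max s0 = s0 →
      (PySem.List.enumerate ss s).foldl
        (fun (st : Int × Int) (p : Int × Int) => if st.1 < p.2 then (p.2, p.1) else st) (s0, i0) = (s0, i0))
  ∧ (s0 < ss.foldl max s0 →
      ((PySem.List.enumerate ss s).foldl
        (fun (st : Int × Int) (p : Int × Int) => if st.1 < p.2 then (p.2, p.1) else st) (s0, i0)).2
        = s + (((PySem.List.index? ss (ss.foldl max s0)).getD 0 : Nat) : Int)) := by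
  induction ss with
  | nil =>
      intro s s0 i0
      exact ⟨rfl, fun _ => rfl, fun h => absurd h (lt_irrefl s0)⟩
  | cons x rest ih =>
      intro s s0 i0
      rw [PySem.List.enumerate_cons]
      simp only [List.foldl_cons]
      by_cases hx : s0 < x
      · rw [if_pos hx]
        have hmax : max s0 x = x := max_eq_right hx.le
        rw [hmax]
        obtain ⟨ih1, ih2, ih3⟩ := ih (s + 1) x s
        refine ⟨ih1, ?_, ?_⟩
        · intro hM
          have := (PySem.List.le_foldl_max rest x).1
          omega
        · intro _
          by_cases heq : x = rest.foldl max x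
          · rw [ih2 heq.symm, ← heq, PySem.List.index?_cons_self]
            simp
          · have hlt : x < rest.foldl max x :=
              lt_of_le_of_ne (PySem.List.le_foldl_max rest x).1 heq
            rw [ih3 hlt]
            have hmem : rest.foldl max x ∈ rest := by
              rcases PySem.List.foldl_max_mem rest x with h1 | h1
              · exact absurd h1.symm heq
              · exact h1
            obtain ⟨k, hk⟩ := Option.isSome_iff_exists.mp
              ((PySem.List.index?_isSome_iff rest (rest.foldl max x)).mpr hmem)
            rw [PySem.List.index?_cons_of_ne rest (by omega), hk]
            simp
            push_cast
            ring
      · rw [if_neg hx]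
        have hmax : max s0 x = s0 := max_eq_left (not_lt.mp hx)
        rw [hmax]
        obtain ⟨ih1, ih2, ih3⟩ := ih (s + 1) s0 i0
        refine ⟨ih1, ih2, ?_⟩
        intro hM
        rw [ih3 hM]
        have hxM : x ≠ rest.foldl max s0 := by omega
        have hmem : rest.foldl max s0 ∈ rest := by
          rcases PySem.List.foldl_max_mem rest s0 with h1 | h1
          · omega
          · exact h1
        obtain ⟨k, hk⟩ := Option.isSome_iff_exists.mp
          ((PySem.List.index?_isSome_iff rest (rest.foldl max s0)).mpr hmem)
        rw [PySem.List.index?_cons_of_ne rest hxM, hk]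
        simp
        push_cast
        ring

-- blocks[first index of the max in the score list] is the first block attaining the max
lemma pv_idx_find (sc : List Char → Int) (blocks : List (List Char)) (M : Int)
    (h : M ∈ blocks.map sc) :
    PySem.List.pyGetD blocks (((PySem.List.index? (blocks.map sc) M).getD 0 : Nat) : Int) []
      = (blocks.find? (fun b => sc b == M)).getD [] := by
  induction blocks with
  | nil => simp at h
  | cons b rest ih =>
      by_cases hb : sc b = M
      · have hidx : PySem.List.index? ((b :: rest).map sc) M = some 0 := by
          simp [PySem.List.index?, List.idxOf?, List.findIdx?_cons, hb]
        rw [hidx]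
        rw [List.find?_cons_of_pos (by simpa using hb)]
        simp
      · have hmem : M ∈ rest.map sc := by
          rcases (by simpa using h : M = sc b ∨ ∃ a ∈ rest, sc a = M) with h1 | ⟨a, ha, hae⟩
          · exact absurd h1 (fun hh => hb hh.symm)
          · exact List.mem_map.mpr ⟨a, ha, hae⟩
        have hsome : (PySem.List.index? (rest.map sc) M).isSome := by
          simp only [PySem.List.index?]
          rw [Option.isSome_iff_ne_none]
          intro hnone
          exact absurd hmem (List.idxOf?_eq_none_iff.mp hnone)
        obtain ⟨i, hi⟩ := Option.isSome_iff_exists.mp hsome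
        have hidx : PySem.List.index? ((b :: rest).map sc) M = some (i + 1) := by
          have : (sc b == M) = false := by simpa using hb
          simp only [PySem.List.index?, List.map_cons, List.idxOf?] at hi ⊢
          rw [List.findIdx?_cons, this]
          simp only [Bool.false_eq_true, if_false]
          rw [hi]
          rfl
        rw [hidx, List.find?_cons_of_neg (by simpa using hb)]
        have := ih hmem
        rw [hi] at this
        simp only [Option.getD_some] at this ⊢
        rw [PySem.List.pyGetD_natCast] at this ⊢
        simpa using this

-- one scores[pos] += 1 step, seen through getElem?
lemma pv_bump_get (sc : List Int) (j : Int) (i : Nat) (h0 : 0 ≤ j) (h1 : j < (sc.length : Int)) :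
    (PySem.List.pySetD sc j (PySem.List.pyGetD sc j 0 + 1))[i]? =
      if (i : Int) = j then sc[i]?.map (· + 1) else sc[i]? := by
  obtain ⟨m, rfl⟩ : ∃ m : Nat, j = (m : Int) := ⟨j.toNat, (Int.toNat_of_nonneg h0).symm⟩
  have hm : m < sc.length := by exact_mod_cast h1
  rw [PySem.List.pySetD_natCast, PySem.List.pyGetD_natCast]
  by_cases hi : i = m
  · subst hi
    rw [List.getElem?_set]
    simp [hm, List.getD_eq_getElem?_getD, List.getElem?_eq_getElem hm]
  · rw [List.getElem?_set]
    have : ((i : Int) = (m : Int)) = False := by simp; omega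
    simp [Ne.symm hi, this]

-- one posting-list scatter pass adds the posting multiplicity at every index
lemma pv_post_get (l : List Int) : ∀ (sc : List Int), (∀ j ∈ l, 0 ≤ j ∧ j < (sc.length : Int)) →
    ∀ i : Nat,
    (l.foldl (fun sc pos => PySem.List.pySetD sc pos (PySem.List.pyGetD sc pos 0 + 1)) sc)[i]?
      = sc[i]?.map (· + (l.count (i : Int) : Int)) := by
  induction l with
  | nil =>
      intro sc _ i
      rw [List.foldl_nil, List.count_nil]
      cases h : sc[i]? <;> simp [h]
  | cons j rest ih =>
      intro sc hl i
      simp only [List.foldl_cons]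
      have hj := hl j (by simp)
      have hlen : (PySem.List.pySetD sc j (PySem.List.pyGetD sc j 0 + 1)).length = sc.length :=
        PySem.List.length_pySetD sc j _
      rw [ih _ (by intro x hx; rw [hlen]; exact hl x (by simp [hx])) i,
        pv_bump_get sc j i hj.1 hj.2]
      by_cases hij : (i : Int) = j
      · rw [if_pos hij]
        have hc : (j :: rest).count (i : Int) = rest.count (i : Int) + 1 := by
          simp [List.count_cons, hij]
        rw [hc]
        cases sc[i]? <;> simp <;> push_cast <;> ring
      · rw [if_neg hij]
        have hc : (j :: rest).count (i : Int) = rest.count (i : Int) := by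
          simp [List.count_cons]; omega
        rw [hc]

lemma pv_post_len (l : List Int) : ∀ (sc : List Int),
    (l.foldl (fun sc pos => PySem.List.pySetD sc pos (PySem.List.pyGetD sc pos 0 + 1)) sc).length
      = sc.length := by
  induction l with
  | nil => intro sc; rfl
  | cons j rest ih =>
      intro sc
      simp only [List.foldl_cons]
      rw [ih, PySem.List.length_pySetD]

-- the whole scatter loop, seen through getElem?
lemma pv_scatter_get (getP : List Char → List Int) (ts : List (List Char)) :
    ∀ (sc : List Int), (∀ t j, j ∈ getP t → 0 ≤ j ∧ j < (sc.length : Int)) → ∀ i : Nat,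
    (ts.foldl (fun sc t => (getP t).foldl
        (fun sc pos => PySem.List.pySetD sc pos (PySem.List.pyGetD sc pos 0 + 1)) sc) sc)[i]?
      = sc[i]?.map (· + (ts.map (fun t => ((getP t).count (i : Int) : Int))).sum) := by
  induction ts with
  | nil =>
      intro sc _ i
      rw [List.foldl_nil, List.map_nil, List.sum_nil]
      cases h : sc[i]? <;> simp [h]
  | cons t rest ih =>
      intro sc hb i
      simp only [List.foldl_cons]
      have hlen : ((getP t).foldl
          (fun sc pos => PySem.List.pySetD sc pos (PySem.List.pyGetD sc pos 0 + 1)) sc).length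
          = sc.length := pv_post_len (getP t) sc
      rw [ih _ (by intro u j hj; rw [hlen]; exact hb u j hj) i,
        pv_post_get (getP t) sc (fun j hj => hb t j hj) i]
      cases sc[i]? <;> simp <;> ring

-- a sum of 0/1 indicators is a countP
lemma pv_sum_indicator (ts : List (List Char)) (p : List Char → Bool) (g : List Char → Int)
    (h : ∀ t ∈ ts, g t = if p t then 1 else 0) :
    (ts.map g).sum = (ts.countP p : Int) := by
  induction ts with
  | nil => simp
  | cons t rest ih =>
      rw [List.map_cons, List.sum_cons, ih (fun u hu => h u (by simp [hu])),
        h t (by simp), List.countP_cons]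
      by_cases hp : p t = true <;> simp [hp] <;> push_cast <;> ring

-- one block's tokens inserted into the index append its position to exactly its tokens' postings
lemma pv_idx_inner (k : Int) (ts : List (List Char)) : ts.Nodup →
    ∀ (d : PySem.Dict (List Char) (List Int)) (t : List Char),
    (ts.foldl (fun d u => d.insert u (d.getD u [] ++ [k])) d).getD t []
      = d.getD t [] ++ (if t ∈ ts then [k] else []) := by
  induction ts with
  | nil => intro _ d t; simp
  | cons u rest ih =>
      intro hnd d t
      simp only [List.foldl_cons]
      rw [ih (List.nodup_cons.mp hnd).2, PySem.Dict.getD_insert]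
      by_cases htu : t = u
      · subst htu
        have : t ∉ rest := (List.nodup_cons.mp hnd).1
        simp [this]
      · simp [htu]

-- the inverted index's posting list for t is the positions of the blocks containing t, in order
lemma pv_idx_build (bs : List (List Char)) : ∀ (s : Int)
    (d : PySem.Dict (List Char) (List Int)) (t : List Char),
    ((PySem.List.enumerate bs s).foldl
        (fun d (p : Int × List Char) =>
          (pvTok p.2).foldl (fun d u => d.insert u (d.getD u [] ++ [p.1])) d) d).getD t []
      = d.getD t []
        ++ (((PySem.List.enumerate bs s).filter (fun p => decide (t ∈ pvTok p.2))).map (·.1)) := by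
  induction bs with
  | nil => intro s d t; simp [PySem.List.enumerate]
  | cons b rest ih =>
      intro s d t
      rw [PySem.List.enumerate_cons]
      simp only [List.foldl_cons, List.filter_cons]
      rw [ih (s + 1), pv_idx_inner s (pvTok b) (PySem.Set.nodup_ofList _) d t]
      by_cases hm : t ∈ pvTok b
      · simp [hm]
      · simp [hm]

-- every posting built over enumerate bs s lies in [s, s + number of blocks)
lemma pv_idx_range (bs : List (List Char)) (s : Int) (p : Int × List Char → Bool) (j : Int)
    (hj : j ∈ ((PySem.List.enumerate bs s).filter p).map (·.1)) :
    s ≤ j ∧ j < s + (bs.length : Int) := by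
  obtain ⟨q, hq, rfl⟩ := List.mem_map.mp hj
  obtain ⟨k, hk, rfl⟩ := (PySem.List.mem_enumerate_iff bs s q).mp (List.mem_of_mem_filter hq)
  simp
  omega

-- multiplicity of position s+i in the posting list built over enumerate bs s
lemma pv_idx_count (bs : List (List Char)) : ∀ (s : Int) (i : Nat) (t : List Char),
    ∀ (hi : i < bs.length),
    ((((PySem.List.enumerate bs s).filter (fun p => decide (t ∈ pvTok p.2))).map (·.1)).count
        (s + (i : Int)))
      = if t ∈ pvTok bs[i] then 1 else 0 := by
  induction bs with
  | nil => intro s i t hi; simp at hi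
  | cons b rest ih =>
      intro s i t hi
      have hzero : ∀ (l : List (List Char)) (s' j : Int), j < s' →
          ((((PySem.List.enumerate l s').filter (fun p => decide (t ∈ pvTok p.2))).map (·.1)).count j)
            = 0 := by
        intro l s' j hjs
        rw [List.count_eq_zero]
        intro hmem
        have := pv_idx_range l s' _ j hmem
        omega
      rw [PySem.List.enumerate_cons]
      simp only [List.filter_cons]
      cases i with
      | zero =>
          by_cases hm : t ∈ pvTok b
          · simp only [hm, decide_true, if_true, List.map_cons, List.count_cons]
            rw [hzero rest (s + 1) (s + (0 : Nat)) (by omega)]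
            simp [hm]
          · simp only [hm, decide_false, Bool.false_eq_true, if_false]
            rw [hzero rest (s + 1) (s + (0 : Nat)) (by omega)]
            simp [hm]
      | succ k =>
          have hk : k < rest.length := by simpa using hi
          have hcast : s + ((k + 1 : Nat) : Int) = (s + 1) + (k : Int) := by push_cast; ring
          have hget : (b :: rest)[k + 1] = rest[k] := by simp
          by_cases hm : t ∈ pvTok b
          · simp only [hm, decide_true, if_true, List.map_cons, List.count_cons]
            have hne : ¬ (s + ((k + 1 : Nat) : Int) = s) := by push_cast; omega
            rw [hcast, ih (s + 1) k t hk]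
            simp only [hget]
            have : ((s : Int) == (s + 1) + (k : Int)) = false := by
              simp; omega
            simp [this]
          · simp only [hm, decide_false, Bool.false_eq_true, if_false]
            rw [hcast, ih (s + 1) k t hk]
            simp only [hget]

-- B's score list is the per-block question-token count, in block order
lemma pv_scores_eq (q : PySem.Set (List Char)) (blocks : List (List Char)) :
    (q.foldl
        (fun sc t => ((((PySem.List.enumerate blocks 0).foldl
            (fun d (p : Int × List Char) =>
              (pvTok p.2).foldl (fun d u => d.insert u (d.getD u [] ++ [p.1])) d)
            (PySem.Dict.empty : PySem.Dict (List Char) (List Int))).getD t []).foldl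
          (fun sc pos => PySem.List.pySetD sc pos (PySem.List.pyGetD sc pos 0 + 1)) sc))
        (List.replicate blocks.length (0 : Int)))
      = blocks.map (fun b => ((q.countP (fun t => decide (t ∈ pvTok b)) : Nat) : Int)) := by
  set idx := (PySem.List.enumerate blocks 0).foldl
      (fun d (p : Int × List Char) =>
        (pvTok p.2).foldl (fun d u => d.insert u (d.getD u [] ++ [p.1])) d)
      (PySem.Dict.empty : PySem.Dict (List Char) (List Int)) with hidx
  have hpost : ∀ t, idx.getD t []
      = ((PySem.List.enumerate blocks 0).filter (fun p => decide (t ∈ pvTok p.2))).map (·.1) := by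
    intro t
    rw [hidx, pv_idx_build blocks 0 PySem.Dict.empty t]
    rfl
  have hrange : ∀ t j, j ∈ idx.getD t [] →
      0 ≤ j ∧ j < ((List.replicate blocks.length (0 : Int)).length : Int) := by
    intro t j hj
    rw [hpost t] at hj
    have := pv_idx_range blocks 0 _ j hj
    simp
    omega
  apply List.ext_getElem?
  intro i
  rw [pv_scatter_get (fun t => idx.getD t []) q _ hrange i]
  by_cases hi : i < blocks.length
  · have h1 : (List.replicate blocks.length (0 : Int))[i]? = some 0 :=
      List.getElem?_replicate_of_lt hi
    have h2 : (blocks.map (fun b => ((q.countP (fun t => decide (t ∈ pvTok b)) : Nat) : Int)))[i]?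
        = some ((q.countP (fun t => decide (t ∈ pvTok blocks[i])) : Nat) : Int) := by
      simp [List.getElem?_map, List.getElem?_eq_getElem hi]
    rw [h1, h2]
    have hsum : (q.map (fun t => (((idx.getD t []).count (i : Int)) : Int))).sum
        = (q.countP (fun t => decide (t ∈ pvTok blocks[i])) : Nat) := by
      apply pv_sum_indicator
      intro t _
      rw [hpost t]
      have := pv_idx_count blocks 0 i t hi
      rw [show (0 : Int) + (i : Int) = (i : Int) by ring] at this
      rw [this]
      by_cases hm : t ∈ pvTok blocks[i] <;> simp [hm]
    simp only [Option.map_some]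
    rw [hsum]
    simp
  · have h1 : (List.replicate blocks.length (0 : Int))[i]? = none := by
      simp; omega
    have h2 : (blocks.map (fun b => ((q.countP (fun t => decide (t ∈ pvTok b)) : Nat) : Int)))[i]?
        = none := by
      simp; omega
    rw [h1, h2]
    rfl

-- ===== VERDICT (by name: the statement is the Claim_ definition above) =====
theorem custom_knowledge_answer_spec : Claim_equal_custom_knowledge_answer := by
  intro message custom _
  unfold Spec_custom_knowledge_answer custom_knowledge_answer custom_knowledge_answer_alt
  by_cases hs : (PySem.Chars.strip custom.toList).isEmpty
  · simp [hs]
  · simp only [hs, Bool.false_eq_true, if_false]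
    set q := pvTok message.toList with hq
    set blocks := ((PySem.Chars.splitOn (PySem.Chars.replace custom.toList ['\r','\n'] ['\n']) ['\n','\n']).filter
        (fun b => !(PySem.Chars.strip b).isEmpty)).map (fun b => PySem.Chars.strip b) with hblocks
    set sc := fun b => ((q.countP (fun t => decide (t ∈ pvTok b)) : Nat) : Int) with hsc
    have hstep : (fun (st : Int × List Char) block =>
        let i := PySem.Chars.find block ['\n']
        let head := if i = -1 then block else block.take i.toNat
        let body := if i = -1 then ([] : List Char) else block.drop (i.toNat + 1)
        let haystack := head ++ ' ' :: (if body.isEmpty then block else body)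
        let score := PySem.Set.len (PySem.Set.inter q (pvTok haystack))
        if st.1 < score then (score, block) else st)
        = (fun (st : Int × List Char) b => if st.1 < sc b then (sc b, b) else st) := by
      funext st block
      simp only [hsc]
      rw [pv_scoreA q block]
    rw [hstep]
    have hscores := pv_scores_eq q blocks
    rw [hscores]
    obtain ⟨hA1, hA2, hA3⟩ := pv_selA sc blocks 0 []
    obtain ⟨hB1, hB2, hB3⟩ := pv_selB (blocks.map sc) 0 0 0
    rw [hA1, hB1]
    have hfm : blocks.foldl (fun a b => max a (sc b)) 0 = (blocks.map sc).foldl max 0 :=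
      by conv_rhs => rw [List.foldl_map]
    rw [← hfm] at hB1 hB2 hB3 ⊢
    set M := blocks.foldl (fun a b => max a (sc b)) 0 with hM
    by_cases h2M : 2 ≤ M
    · rw [if_pos h2M, if_pos h2M]
      have hMpos : (0 : Int) < M := by omega
      rw [hA3 hMpos, hB3 hMpos]
      have hmem : M ∈ blocks.map sc := by
        rcases PySem.List.foldl_max_mem (blocks.map sc) 0 with hh | hh
        · rw [hfm] at hM; omega
        · rw [hfm]; exact hh
      have := pv_idx_find sc blocks M hmem
      rw [show (0 : Int) + (((PySem.List.index? (blocks.map sc) M).getD 0 : Nat) : Int)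
            = (((PySem.List.index? (blocks.map sc) M).getD 0 : Nat) : Int) by ring]
      rw [this]
    · rw [if_neg h2M, if_neg h2M]
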